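-- pv_equiv track=rewrite | github.com/Kohulan/ChemAudit | backend/app/services/dataset_intelligence/batch_processor.py | _detect_smiles_column
-- ===== SOURCE A (Python) =====
-- _SMILES_COLUMN_NAMES = {
--     "smiles", "smi", "canonical_smiles", "isomeric_smiles",
--     "structure", "input_smiles", "mol_smiles",
-- }
--
-- def _detect_smiles_column(columns: list[str]) -> str | None:
--     """Detect the SMILES column name from a list of column names.
--
--     Checks exact case-insensitive match first, then substring match.
--
--     Args:
--         columns: List of column names from the dataset.
--
--     Returns:
--         Matched column name, or None if no match found.
--     """
--     for col in columns:
--         if col.lower() in _SMILES_COLUMN_NAMES: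
--             return col
--     # Fallback: substring match
--     for col in columns:
--         col_lower = col.lower()
--         if "smiles" in col_lower or "smi" == col_lower:
--             return col
--     return None
-- ===== SOURCE B (Python) =====
-- _SMILES_COLUMN_NAMES = {
--     "smiles", "smi", "canonical_smiles", "isomeric_smiles",
--     "structure", "input_smiles", "mol_smiles",
-- }
--
-- def _detect_smiles_column(columns: list[str]) -> str | None:
--     """Single pass: return the first exact (case-insensitive) match immediately;
--     remember the first substring match as a fallback, used only after the scan."""
--     fallback = None
--     for col in columns:
--         col_lower = col.lower()
--         if col_lower in _SMILES_COLUMN_NAMES: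
--             return col
--         if fallback is None and ("smiles" in col_lower or col_lower == "smi"):
--             fallback = col
--     return fallback
-- ===== Notes on version B (the rewrite author's own statement) =====
-- stated objective: simpler
-- what changed: Two sequential passes over columns (exact-match scan, then substring scan) merged into one pass that returns an exact match immediately and keeps the first substring hit in a fallback variable returned after the loop.
import Mathlib
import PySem

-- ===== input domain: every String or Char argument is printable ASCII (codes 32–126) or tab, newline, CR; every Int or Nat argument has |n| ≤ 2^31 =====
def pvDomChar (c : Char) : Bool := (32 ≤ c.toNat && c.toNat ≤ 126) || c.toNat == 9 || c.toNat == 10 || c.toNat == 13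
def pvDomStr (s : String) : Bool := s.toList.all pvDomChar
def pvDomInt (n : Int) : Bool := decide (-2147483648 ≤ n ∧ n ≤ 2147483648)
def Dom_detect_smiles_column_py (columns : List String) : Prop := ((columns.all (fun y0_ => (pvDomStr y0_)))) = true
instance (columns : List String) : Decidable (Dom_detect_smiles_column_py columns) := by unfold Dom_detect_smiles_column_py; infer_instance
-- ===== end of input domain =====

-- ===== PORT A =====
-- B merges A's two passes into one pass with a fallback variable; same return value, no side effects.
-- Python set _SMILES_COLUMN_NAMES, used only for membership tests.
def pvSmilesNames : List String :=
  ["smiles", "smi", "canonical_smiles", "isomeric_smiles",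
   "structure", "input_smiles", "mol_smiles"]

-- col.lower() in _SMILES_COLUMN_NAMES
def pvExactP (col : String) : Bool := pvSmilesNames.contains (PySem.Str.lower col)

-- "smiles" in col_lower or "smi" == col_lower
def pvSubP (col : String) : Bool :=
  PySem.Str.isIn "smiles" (PySem.Str.lower col) || PySem.Str.lower col == "smi"

-- first loop of A: return first exact case-insensitive match
def pvPass1 : List String → Option String
  | [] => none
  | col :: rest => if pvExactP col then some col else pvPass1 rest

-- second loop of A: return first substring match
def pvPass2 : List String → Option String
  | [] => none
  | col :: rest => if pvSubP col then some col else pvPass2 rest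

def detect_smiles_column_py (columns : List String) : Option String :=
  match pvPass1 columns with
  | some c => some c
  | none => pvPass2 columns

-- ===== PORT B =====
-- single pass carrying the fallback accumulator (Source B's loop)
def pvAltLoop : List String → Option String → Option String
  | [], fallback => fallback
  | col :: rest, fallback =>
    let colLower := PySem.Str.lower col
    if pvSmilesNames.contains colLower then some col
    else pvAltLoop rest
      (if fallback.isNone &&
            (PySem.Str.isIn "smiles" colLower || colLower == "smi") then
        some col
      else fallback)

def detect_smiles_column_py_alt (columns : List String) : Option String :=
  pvAltLoop columns none

-- ===== PRECONDITION & SPEC =====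
def Spec_detect_smiles_column_py (columns : List String) (out : Option String) : Prop := out = detect_smiles_column_py_alt columns
instance (columns : List String) (out : Option String) : Decidable (Spec_detect_smiles_column_py columns out) := by unfold Spec_detect_smiles_column_py; infer_instance

-- ===== CLAIM (what is proved, stated in full; the proofs are below) =====
def Claim_equal_detect_smiles_column_py : Prop := ∀ (columns : List String), Dom_detect_smiles_column_py columns → Spec_detect_smiles_column_py columns (detect_smiles_column_py columns)

-- ===== LEMMAS AND PROOFS =====

-- the single-pass loop equals: first exact match, else the fallback, else the first substring match
theorem pvAltLoop_eq (cols : List String) (fb : Option String) :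
    pvAltLoop cols fb =
      match pvPass1 cols with
      | some c => some c
      | none => (fb.or (pvPass2 cols)) := by
  induction cols generalizing fb with
  | nil => cases fb <;> simp [pvAltLoop, pvPass1, pvPass2]
  | cons col rest ih =>
    rw [show pvAltLoop (col :: rest) fb =
          (if pvExactP col then some col
           else pvAltLoop rest
             (if fb.isNone && pvSubP col then some col else fb)) from rfl]
    rw [show pvPass1 (col :: rest) = (if pvExactP col then some col else pvPass1 rest) from rfl]
    rw [show pvPass2 (col :: rest) = (if pvSubP col then some col else pvPass2 rest) from rfl]
    by_cases he : pvExactP col = true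
    · simp [he]
    · simp only [he, Bool.false_eq_true, ite_false, ih]
      cases fb with
      | some x => simp
      | none =>
        by_cases hs : pvSubP col = true
        · simp only [hs, Option.isNone_none, Bool.true_and, ite_true, Option.none_or]
          cases pvPass1 rest <;> simp
        · simp [hs]

-- ===== VERDICT (by name: the statement is the Claim_ definition above) =====
theorem detect_smiles_column_py_spec : Claim_equal_detect_smiles_column_py := by
  intro columns _
  unfold Spec_detect_smiles_column_py detect_smiles_column_py detect_smiles_column_py_alt
  rw [pvAltLoop_eq]
  cases pvPass1 columns <;> simp
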